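-- pv_equiv track=rewrite | github.com/Vishnuvardhan799/B.Tech-NIT-Trichy-CSE-26 | V-Sem/Sem5Senior/CSPC52 - DBMS/keys.py | demask
-- ===== SOURCE A (Python) =====
-- def demask(att, n):
--     str = ""
--     op = int(pow(2, len(att)-1)) # bitmask operator
--     p = 0 # position of attribute
--     while (op > 0):
--         if (n & op):
--             str += att[p]
--         op //= 2
--         p += 1
--     return str
-- ===== SOURCE B (Python) =====
-- def demask(att, n):
--     # Precompute the fixed-width bit pattern of n (low len(att) bits, two's
--     # complement, most significant first), then select attributes with one
--     # zip pass.
--     bits = ''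
--     m = n
--     for _ in att:
--         bits = ('1' if m % 2 else '0') + bits
--         m //= 2
--     return ''.join(a for a, b in zip(att, bits) if b == '1')
-- ===== Notes on version B (the rewrite author's own statement) =====
-- stated objective: simpler
-- what changed: B replaces A's sliding-bitmask loop (op = 2^(len-1), op //= 2, index p into att, str +=) by precomputing the fixed-width bit pattern of n once (one pass of % 2 / //= 2) and then selecting attributes with a single zip/filter/''.join pass.
import Mathlib
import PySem

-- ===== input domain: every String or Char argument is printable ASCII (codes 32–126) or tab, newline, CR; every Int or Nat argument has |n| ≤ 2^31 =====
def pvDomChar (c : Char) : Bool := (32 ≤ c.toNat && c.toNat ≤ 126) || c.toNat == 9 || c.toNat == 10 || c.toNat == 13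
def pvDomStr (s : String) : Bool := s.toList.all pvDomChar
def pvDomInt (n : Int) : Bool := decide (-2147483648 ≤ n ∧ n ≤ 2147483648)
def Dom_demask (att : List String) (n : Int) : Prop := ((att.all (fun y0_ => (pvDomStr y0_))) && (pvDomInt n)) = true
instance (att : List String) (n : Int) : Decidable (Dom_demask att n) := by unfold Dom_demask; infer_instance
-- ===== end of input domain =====

-- B precomputes the fixed-width bit pattern of n once and then selects attributes with a
-- single zip pass, instead of A's sliding-bitmask loop; objective: simpler decomposition.

-- ===== PORT A =====
-- the while loop of A: state is (op, p, acc); terminates because op strictly decreases to 0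
def demaskLoop (att : List String) (n : Int) (op : Int) (p : Nat) (acc : String) : String :=
  if h : op > 0 then
    -- if (n & op): str += att[p]   (att[p] is always in range here, so getD is exact)
    let acc' := if PySem.Int.band n op ≠ 0 then acc ++ att.getD p "" else acc
    demaskLoop att n (PySem.Int.floordiv op 2) (p + 1) acc'
  else acc
  termination_by op.toNat
  decreasing_by
    rw [PySem.Int.floordiv_eq_ediv_of_pos (by omega)]
    omega

def demask (att : List String) (n : Int) : String :=
  -- op = int(pow(2, len(att)-1)): integer pow for len ≥ 1; pow(2,-1) = 0.5, int(0.5) = 0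
  demaskLoop att n (if att.length = 0 then 0 else 2 ^ (att.length - 1)) 0 ""

-- ===== PORT B =====
-- the first loop of B: builds the bit-pattern string by prepending, state is (bits, m)
def demaskBits (att : List String) (n : Int) : List Char :=
  (att.foldl
    (fun st _ =>
      ((if PySem.Int.mod st.2 2 ≠ 0 then '1' else '0') :: st.1, PySem.Int.floordiv st.2 2))
    (([] : List Char), n)).1

def demask_alt (att : List String) (n : Int) : String :=
  -- ''.join(a for a, b in zip(att, bits) if b == '1')
  PySem.Str.join "" (((att.zip (demaskBits att n)).filter (fun q => q.2 == '1')).map Prod.fst)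

-- ===== PRECONDITION & SPEC =====
def Spec_demask (att : List String) (n : Int) (out : String) : Prop := out = demask_alt att n
instance (att : List String) (n : Int) (out : String) : Decidable (Spec_demask att n out) := by unfold Spec_demask; infer_instance

-- ===== CLAIM (what is proved, stated in full; the proofs are below) =====
def Claim_equal_demask : Prop := ∀ (att : List String) (n : Int), Dom_demask att n → Spec_demask att n (demask att n)

-- ===== LEMMAS AND PROOFS =====

-- the bit pattern of n of width L, most significant bit first (a clean recursion on L)
def pvBits (n : Int) (L : Nat) : List Char :=
  match L with
  | 0 => []
  | L + 1 => pvBits (PySem.Int.floordiv n 2) L ++ [if PySem.Int.mod n 2 ≠ 0 then '1' else '0']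

-- the zip/filter/map/join of demask_alt, as a recursion on the two lists
def pvSelect (xs : List String) (bs : List Char) : String :=
  match xs, bs with
  | x :: xs, b :: bs => (if b = '1' then x else "") ++ pvSelect xs bs
  | _, _ => ""

theorem pvNatbit (m K : Nat) : (m &&& 2 ^ K ≠ 0) ↔ m / 2 ^ K % 2 = 1 := by
  rw [Nat.and_two_pow]
  rcases h : m.testBit K <;> simp_all [Nat.testBit_eq_decide_div_mod_eq]

-- bridge between A's test "n & 2^K != 0" and floor-division bit extraction
theorem pvBandIff (n : Int) (K : Nat) :
    (PySem.Int.band n (2 ^ K) ≠ 0) ↔ PySem.Int.mod (PySem.Int.floordiv n (2 ^ K)) 2 = 1 := by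
  have h2 : (0 : Int) < 2 ^ K := by positivity
  rw [PySem.Int.mod_eq_emod_of_pos (by omega), PySem.Int.floordiv_eq_ediv_of_pos h2]
  unfold PySem.Int.band
  have h2' : ((2 : Int) ^ K).toNat = 2 ^ K := by
    rw [show ((2 : Int) ^ K) = ((2 ^ K : Nat) : Int) by push_cast; ring]
    exact Int.toNat_natCast _
  by_cases ha : 0 ≤ n
  · rw [if_pos ha, if_pos (le_of_lt h2), h2']
    obtain ⟨m, rfl⟩ := Int.eq_ofNat_of_zero_le ha
    have hdiv : (m : Int) / (2 ^ K) % 2 = ((m / 2 ^ K % 2 : Nat) : Int) := by push_cast; rfl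
    rw [hdiv, Int.toNat_natCast]
    constructor
    · intro h; have := (pvNatbit m K).mp (by exact_mod_cast h); omega
    · intro h; have := (pvNatbit m K).mpr (by omega); exact_mod_cast this
  · rw [if_neg ha, if_pos (le_of_lt h2), h2']
    set m := (-n - 1).toNat with hm
    have hn : n = -(m : Int) - 1 := by omega
    set d := m / 2 ^ K with hd
    have htb : 2 ^ K &&& m = 2 ^ K * (m.testBit K).toNat := Nat.two_pow_and m K
    have hdm : m % 2 ^ K < 2 ^ K := Nat.mod_lt _ (by positivity)
    have hdiveq : n / (2 ^ K) = -(d : Int) - 1 := by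
      have := (Int.ediv_emod_unique (a := n) (b := 2 ^ K)
        (q := -(d : Int) - 1) (r := (2 ^ K : Int) - 1 - (m % 2 ^ K : Nat)) h2).mpr ?_
      · exact this.1
      · refine ⟨?_, by push_cast; omega, by push_cast; omega⟩
        have hmd : (2 ^ K) * d + m % 2 ^ K = m := Nat.div_add_mod m (2 ^ K) |>.symm ▸ by omega
        push_cast
        rw [hn]
        push_cast at hmd ⊢
        nlinarith [hmd]
    rw [hdiveq]
    have hbit : m.testBit K = decide (d % 2 = 1) := Nat.testBit_eq_decide_div_mod_eq
    have h2n : (0 : Nat) < 2 ^ K := by positivity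
    rcases h : m.testBit K with _ | _ <;> rw [h] at htb hbit <;>
      simp only [Bool.toNat_false, Bool.toNat_true, mul_zero, mul_one] at htb
    · have hb' : d % 2 ≠ 1 := by simpa using hbit.symm
      rw [htb]
      constructor <;> intro hx <;> omega
    · have hb' : d % 2 = 1 := by simpa using hbit.symm
      rw [htb]
      constructor <;> intro hx <;> omega

theorem pvJoinCons (x : String) (xs : List String) :
    PySem.Str.join "" (x :: xs) = x ++ PySem.Str.join "" xs := by
  have h : ∀ (y : List Char) (ys : List (List Char)),
      ([] : List Char).intercalate (y :: ys) = y ++ ([] : List Char).intercalate ys := by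
    intro y ys; cases ys <;> simp [List.intercalate]
  simp [PySem.Str.join, PySem.Chars.join, h, String.ofList_append, String.ofList_toList]

-- demask_alt's join/filter/map over zip is pvSelect
theorem pvJoinSelect (xs : List String) (bs : List Char) :
    PySem.Str.join "" (((xs.zip bs).filter (fun q => q.2 == '1')).map Prod.fst)
      = pvSelect xs bs := by
  induction xs generalizing bs with
  | nil => simp [pvSelect, PySem.Str.join, PySem.Chars.join, List.intercalate]
  | cons x xs ih =>
    cases bs with
    | nil => simp [pvSelect, PySem.Str.join, PySem.Chars.join, List.intercalate]
    | cons b bs =>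
      by_cases hb : b = '1' <;>
        simp [pvSelect, hb, pvJoinCons, ih, String.empty_append]

-- B's first loop builds exactly pvBits (the whole foldl state, by induction on att)
theorem pvFoldBits (att : List String) (bits : List Char) (m : Int) :
    att.foldl
      (fun st _ =>
        ((if PySem.Int.mod st.2 2 ≠ 0 then '1' else '0') :: st.1, PySem.Int.floordiv st.2 2))
      (bits, m)
      = (pvBits m att.length ++ bits, PySem.Int.floordiv m (2 ^ att.length)) := by
  induction att generalizing bits m with
  | nil => simp [pvBits, PySem.Int.floordiv_eq_ediv_of_pos]
  | cons a att ih =>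
    simp only [List.foldl_cons, ih, List.length_cons, pvBits, List.append_assoc,
      List.singleton_append]
    refine Prod.ext rfl ?_
    show PySem.Int.floordiv (PySem.Int.floordiv m 2) (2 ^ att.length)
        = PySem.Int.floordiv m (2 ^ (att.length + 1))
    rw [PySem.Int.floordiv_eq_ediv_of_pos (b := 2) (by omega),
        PySem.Int.floordiv_eq_ediv_of_pos (b := 2 ^ att.length) (by positivity),
        PySem.Int.floordiv_eq_ediv_of_pos (b := 2 ^ (att.length + 1)) (by positivity),
        Int.ediv_ediv_of_nonneg (by omega : (0:Int) ≤ 2), pow_succ']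

-- peeling the HIGH bit off the width-(K+1) pattern
theorem pvBitsCons (n : Int) (K : Nat) :
    pvBits n (K + 1) = (if PySem.Int.band n (2 ^ K) ≠ 0 then '1' else '0') :: pvBits n K := by
  induction K generalizing n with
  | zero =>
    have h1 : PySem.Int.band n (2 ^ 0) = PySem.Int.mod n 2 := by
      simpa using PySem.Int.band_one n
    rw [show pvBits n 1 = [if PySem.Int.mod n 2 ≠ 0 then '1' else '0'] from rfl, ← h1]
    rfl
  | succ K ih =>
    have hdiv : PySem.Int.floordiv (PySem.Int.floordiv n 2) (2 ^ K)
        = PySem.Int.floordiv n (2 ^ (K + 1)) := by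
      rw [PySem.Int.floordiv_eq_ediv_of_pos (b := 2) (by omega),
        PySem.Int.floordiv_eq_ediv_of_pos (b := 2 ^ K) (by positivity),
        PySem.Int.floordiv_eq_ediv_of_pos (b := 2 ^ (K + 1)) (by positivity),
        Int.ediv_ediv_of_nonneg (by omega : (0:Int) ≤ 2), pow_succ']
    have hband : (PySem.Int.band (PySem.Int.floordiv n 2) (2 ^ K) ≠ 0)
        ↔ (PySem.Int.band n (2 ^ (K + 1)) ≠ 0) := by
      rw [pvBandIff, pvBandIff, hdiv]
    calc pvBits n (K + 2)
        = pvBits (PySem.Int.floordiv n 2) (K + 1)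
            ++ [if PySem.Int.mod n 2 ≠ 0 then '1' else '0'] := rfl
      _ = ((if PySem.Int.band (PySem.Int.floordiv n 2) (2 ^ K) ≠ 0 then '1' else '0')
            :: pvBits (PySem.Int.floordiv n 2) K)
            ++ [if PySem.Int.mod n 2 ≠ 0 then '1' else '0'] := by rw [ih]
      _ = (if PySem.Int.band n (2 ^ (K + 1)) ≠ 0 then '1' else '0') :: pvBits n (K + 1) := by
            have hc : (if PySem.Int.band (PySem.Int.floordiv n 2) (2 ^ K) ≠ 0 then '1' else '0')
                = (if PySem.Int.band n (2 ^ (K + 1)) ≠ 0 then '1' else '0') := by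
              by_cases hb : PySem.Int.band n (2 ^ (K + 1)) ≠ 0
              · rw [if_pos (hband.mpr hb), if_pos hb]
              · rw [if_neg (fun h => hb (hband.mp h)), if_neg hb]
            rw [hc, List.cons_append]
            rfl

-- pvSelect splits off its head pair
theorem pvSelectCons (x : String) (xs : List String) (b : Char) (bs : List Char) :
    pvSelect (x :: xs) (b :: bs) = (if b = '1' then x else "") ++ pvSelect xs bs := rfl

-- pvSelect with an exhausted bit list
theorem pvSelectNilRight (xs : List String) : pvSelect xs [] = "" := by
  cases xs <;> rfl

-- a non-positive mask ends A's loop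
theorem pvLoopStop (att : List String) (n : Int) (op : Int) (p : Nat) (acc : String)
    (h : ¬ op > 0) : demaskLoop att n op p acc = acc := by
  rw [demaskLoop, dif_neg h]

-- A's while loop computes acc ++ (selection over the remaining suffix)
theorem pvLoopEq (att : List String) (n : Int) (K p : Nat) (acc : String)
    (hlen : p + (K + 1) = att.length) :
    demaskLoop att n (2 ^ K) p acc = acc ++ pvSelect (att.drop p) (pvBits n (K + 1)) := by
  induction K generalizing p acc with
  | zero =>
    have hp : p < att.length := by omega
    rw [demaskLoop, dif_pos (by positivity)]
    rw [show PySem.Int.floordiv (2 ^ 0 : Int) 2 = 0 from by decide]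
    rw [pvLoopStop att n 0 (p + 1) _ (by omega)]
    rw [pvBitsCons n 0, List.drop_eq_getElem_cons hp, pvSelectCons,
      show pvBits n 0 = [] from rfl, pvSelectNilRight]
    have hg : att.getD p "" = att[p] := List.getD_eq_getElem att "" hp
    by_cases hb : PySem.Int.band n (2 ^ 0) = 0
    · rw [if_neg (fun h => h hb), if_neg (c := PySem.Int.band n (2 ^ 0) ≠ 0) (fun h => h hb),
        if_neg (show ¬ ('0' : Char) = '1' by decide), String.append_empty,
        String.append_empty]
    · rw [if_pos hb, if_pos (c := PySem.Int.band n (2 ^ 0) ≠ 0) hb, if_pos rfl,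
        String.append_empty, hg]
  | succ K ih =>
    have hp : p < att.length := by omega
    rw [demaskLoop, dif_pos (by positivity)]
    rw [show PySem.Int.floordiv (2 ^ (K + 1) : Int) 2 = 2 ^ K from by
      rw [PySem.Int.floordiv_eq_ediv_of_pos (by omega), pow_succ]
      exact Int.mul_ediv_cancel _ (by omega)]
    rw [ih (p + 1) _ (by omega)]
    rw [pvBitsCons n (K + 1), List.drop_eq_getElem_cons hp, pvSelectCons]
    have hg : att.getD p "" = att[p] := List.getD_eq_getElem att "" hp
    by_cases hb : PySem.Int.band n (2 ^ (K + 1)) = 0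
    · rw [if_neg (fun h => h hb),
        if_neg (c := PySem.Int.band n (2 ^ (K + 1)) ≠ 0) (fun h => h hb),
        if_neg (show ¬ ('0' : Char) = '1' by decide), String.empty_append]
    · rw [if_pos hb, if_pos (c := PySem.Int.band n (2 ^ (K + 1)) ≠ 0) hb, if_pos rfl, hg,
        String.append_assoc]

-- B's bit string is pvBits
theorem pvDemaskBitsEq (att : List String) (n : Int) :
    demaskBits att n = pvBits n att.length := by
  unfold demaskBits
  rw [pvFoldBits]
  simp

-- ===== VERDICT (by name: the statement is the Claim_ definition above) =====
theorem demask_spec : Claim_equal_demask := by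
  intro att n _
  unfold Spec_demask demask demask_alt
  rw [pvJoinSelect, pvDemaskBitsEq]
  cases hL : att.length with
  | zero =>
    have : att = [] := List.length_eq_zero_iff.mp hL
    subst this
    rw [if_pos rfl, pvLoopStop _ _ _ _ _ (by omega)]
    rfl
  | succ K =>
    rw [if_neg (by omega), Nat.add_sub_cancel]
    rw [pvLoopEq att n K 0 "" (by omega)]
    rw [List.drop_zero, String.empty_append]
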